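-- pv_equiv track=rewrite | github.com/iftekherhossain/medibot-services | tremor_analysis/test_hand_detection.py | count_direction_changes
-- ===== SOURCE A (Python) =====
-- def count_direction_changes(values, threshold):
--     # Initialize variables
--     direction_changes = 0
--     current_direction = None  # Track current direction, either "up" or "down"
--
--     # Loop through each pair of consecutive values
--     for i in range(1, len(values)):
--         # Calculate the difference between consecutive values
--         diff = values[i] - values[i - 1]
--         if abs(diff) >= threshold:
--             # Determine the direction: "up" or "down"
--             if diff > 0:
--                 new_direction = "up"
--             elif diff < 0:
--                 new_direction = "down"
--             else:
--                 new_direction = None  # No change if diff is 0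
--
--             # Count change in direction
--             if current_direction and new_direction and current_direction != new_direction:
--                 direction_changes += 1
--
--             # Update the current direction
--             current_direction = new_direction
--
--     return direction_changes
-- ===== SOURCE B (Python) =====
-- def count_direction_changes(values, threshold):
--     # qualifying consecutive differences (no direction tokens needed)
--     diffs = [b - a for a, b in zip(values, values[1:]) if abs(b - a) >= threshold]
--     # a reversal is an adjacent pair of qualifying diffs with a negative product
--     return sum(1 for x, y in zip(diffs, diffs[1:]) if x * y < 0)
-- ===== Notes on version B (the rewrite author's own statement) =====
-- stated objective: idiomatic
-- what changed: Dropped A's up/down string tokens and its state machine entirely: B builds the list of threshold-qualifying consecutive differences and counts adjacent pairs with a negative product (a sign reversal), which is equivalent because two qualifying diffs give a counted change exactly when both are nonzero with opposite signs.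
import Mathlib
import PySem

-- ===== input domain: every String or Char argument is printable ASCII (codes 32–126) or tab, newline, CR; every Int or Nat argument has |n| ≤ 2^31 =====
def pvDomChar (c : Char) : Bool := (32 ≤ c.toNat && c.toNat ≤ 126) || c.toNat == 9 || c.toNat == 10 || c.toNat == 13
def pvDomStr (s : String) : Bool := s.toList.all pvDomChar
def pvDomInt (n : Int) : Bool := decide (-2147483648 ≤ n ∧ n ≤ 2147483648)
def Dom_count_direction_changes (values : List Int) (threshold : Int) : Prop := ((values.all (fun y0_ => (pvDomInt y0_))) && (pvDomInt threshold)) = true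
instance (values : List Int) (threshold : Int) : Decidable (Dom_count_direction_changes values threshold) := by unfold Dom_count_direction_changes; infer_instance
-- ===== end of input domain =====

-- B drops A's up/down tokens and state machine: it lists the threshold-qualifying consecutive differences and counts adjacent pairs with a negative product (idiomatic alternative, same cost).


-- ===== PORT A =====
-- A's fused loop: for i in range(1, len(values)), state = (direction_changes, current_direction)
def count_direction_changes (values : List Int) (threshold : Int) : Int :=
  ((PySem.List.pyRange 1 values.length 1).foldl
    (fun st i =>
      let diff := PySem.List.pyGetD values i 0 - PySem.List.pyGetD values (i - 1) 0
      if threshold ≤ |diff| then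
        let new_direction : Option String :=
          if 0 < diff then some "up" else if diff < 0 then some "down" else none
        let direction_changes :=
          if st.2.isSome && new_direction.isSome && st.2 != new_direction then st.1 + 1 else st.1
        (direction_changes, new_direction)
      else st)
    ((0 : Int), (none : Option String))).1

-- ===== PORT B =====
-- B: qualifying consecutive differences, then count adjacent pairs with a negative product
def count_direction_changes_alt (values : List Int) (threshold : Int) : Int :=
  let diffs : List Int :=
    ((values.zip values.tail).filter (fun p => decide (threshold ≤ |p.2 - p.1|))).map
      (fun p => p.2 - p.1)
  (((diffs.zip diffs.tail).filter (fun p => decide (p.1 * p.2 < 0))).length : Int)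

-- ===== PRECONDITION & SPEC =====
def Spec_count_direction_changes (values : List Int) (threshold : Int) (out : Int) : Prop := out = count_direction_changes_alt values threshold
instance (values : List Int) (threshold : Int) (out : Int) : Decidable (Spec_count_direction_changes values threshold out) := by unfold Spec_count_direction_changes; infer_instance

-- ===== CLAIM (what is proved, stated in full; the proofs are below) =====
def Claim_equal_count_direction_changes : Prop := ∀ (values : List Int) (threshold : Int), Dom_count_direction_changes values threshold → Spec_count_direction_changes values threshold (count_direction_changes values threshold)

-- ===== LEMMAS AND PROOFS =====

-- direction token of a diff (A's new_direction)
def pvTok (d : Int) : Option String :=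
  if 0 < d then some "up" else if d < 0 then some "down" else none

-- A's loop body, as a function of the diff (definitionally A's lambda composed with the diff)
def pvStepA (threshold : Int) (st : Int × Option String) (diff : Int) : Int × Option String :=
  if threshold ≤ |diff| then
    ((if st.2.isSome && (pvTok diff).isSome && st.2 != pvTok diff then st.1 + 1 else st.1),
      pvTok diff)
  else st

-- the unguarded state machine step
def pvStepSM (st : Int × Option String) (diff : Int) : Int × Option String :=
  ((if st.2.isSome && (pvTok diff).isSome && st.2 != pvTok diff then st.1 + 1 else st.1),
    pvTok diff)

-- A's indexed diff list equals the zip-list diff list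
theorem pv_diffs_eq (values : List Int) :
    (PySem.List.pyRange 1 values.length 1).map
        (fun i => PySem.List.pyGetD values i 0 - PySem.List.pyGetD values (i - 1) 0)
      = (values.zip values.tail).map (fun p => p.2 - p.1) := by
  apply List.ext_getElem
  · simp [PySem.List.length_pyRange_one]
  · intro k h1 h2
    simp only [List.getElem_map, PySem.List.getElem_pyRange_one, List.getElem_zip,
      List.getElem_tail]
    have hk : k + 1 < values.length := by
      simp [PySem.List.length_pyRange_one] at h1; omega
    have h1i : ((1 : Int) + k) = ((k + 1 : Nat) : Int) := by push_cast; ring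
    have h2i : ((k + 1 : Nat) : Int) - 1 = ((k : Nat) : Int) := by push_cast; ring
    rw [h1i, h2i, PySem.List.pyGetD_natCast, PySem.List.pyGetD_natCast]
    simp [List.getD_eq_getElem?_getD, hk, Nat.lt_of_succ_lt hk]

-- fold over a mapped list
theorem pv_foldl_map {α β γ : Type} (g : α → β) (f : γ → β → γ) (l : List α) (init : γ) :
    (l.map g).foldl f init = l.foldl (fun s x => f s (g x)) init := by
  induction l generalizing init with
  | nil => rfl
  | cons x l ih => simp [ih]

-- the token test equals the sign-product test
theorem pv_tok_prod (d x : Int) :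
    ((pvTok d).isSome && (pvTok x).isSome && (pvTok d != pvTok x)) = decide (d * x < 0) := by
  rcases lt_trichotomy 0 d with hd | hd | hd
  · rcases lt_trichotomy 0 x with hx | hx | hx
    · have hs : ¬ d * x < 0 := not_lt.2 (le_of_lt (mul_pos hd hx))
      simp [pvTok, hd, hx, hs]
    · subst hx
      simp [pvTok, hd]
    · have hs : d * x < 0 := mul_neg_of_pos_of_neg hd hx
      simp [pvTok, hd, hx, not_lt_of_gt hx, hs]
  · subst hd
    simp [pvTok]
  · rcases lt_trichotomy 0 x with hx | hx | hx
    · have hs : d * x < 0 := mul_neg_of_neg_of_pos hd hx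
      simp [pvTok, hd, hx, not_lt_of_gt hd, hs]
    · subst hx
      simp [pvTok, hd, not_lt_of_gt hd]
    · have hs : ¬ d * x < 0 := not_lt.2 (le_of_lt (mul_pos_of_neg_of_neg hd hx))
      simp [pvTok, hd, hx, not_lt_of_gt hd, not_lt_of_gt hx, hs]

-- the state machine over a diff list counts exactly the adjacent sign reversals
theorem pv_sm (l : List Int) : ∀ (d c : Int),
    (l.foldl pvStepSM (c, pvTok d)).1
      = c + ((((d :: l).zip l).filter (fun p => decide (p.1 * p.2 < 0))).length : Int) := by
  induction l with
  | nil => intro d c; simp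
  | cons x l ih =>
    intro d c
    simp only [List.foldl_cons, List.zip_cons_cons, List.filter_cons]
    have hst : pvStepSM (c, pvTok d) x
        = ((if ((pvTok d).isSome && (pvTok x).isSome && (pvTok d != pvTok x)) then c + 1 else c),
            pvTok x) := rfl
    rw [hst, pv_tok_prod d x]
    by_cases h : d * x < 0
    · simp only [h, decide_true, if_true, ih x, List.length_cons]
      push_cast
      omega
    · simp [h, ih x]

-- A's guarded fold equals the state machine run over the filtered diff list
theorem pv_filter_fuse (threshold : Int) (l : List Int) : ∀ (st : Int × Option String),
    l.foldl (pvStepA threshold) st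
      = (l.filter (fun diff => decide (threshold ≤ |diff|))).foldl pvStepSM st := by
  induction l with
  | nil => intro st; rfl
  | cons x l ih =>
    intro st
    rw [List.foldl_cons, List.filter_cons]
    by_cases h : threshold ≤ |x|
    · have hx : pvStepA threshold st x = pvStepSM st x := by
        simp [pvStepA, pvStepSM, h]
      simp only [h, decide_true, if_true, List.foldl_cons, hx, ih]
    · have hx : pvStepA threshold st x = st := by
        simp [pvStepA, h]
      simp [h, hx, ih]

-- the state machine from the initial state counts the adjacent sign reversals of the diff list
theorem pv_count (diffs : List Int) :
    (diffs.foldl pvStepSM ((0 : Int), (none : Option String))).1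
      = (((diffs.zip diffs.tail).filter (fun p => decide (p.1 * p.2 < 0))).length : Int) := by
  cases diffs with
  | nil => simp
  | cons x l =>
    have h0 : pvStepSM ((0 : Int), (none : Option String)) x = ((0 : Int), pvTok x) := rfl
    rw [List.foldl_cons, h0, pv_sm l x 0]
    simp

-- ===== VERDICT (by name: the statement is the Claim_ definition above) =====
theorem count_direction_changes_spec : Claim_equal_count_direction_changes := by
  intro values threshold _
  show (List.foldl
      (fun st i => pvStepA threshold st
        (PySem.List.pyGetD values i 0 - PySem.List.pyGetD values (i - 1) 0))
      ((0 : Int), (none : Option String)) (PySem.List.pyRange 1 values.length 1)).1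
    = count_direction_changes_alt values threshold
  rw [← pv_foldl_map (fun i => PySem.List.pyGetD values i 0 - PySem.List.pyGetD values (i - 1) 0)
      (pvStepA threshold), pv_diffs_eq, pv_filter_fuse, List.filter_map, pv_count]
  rfl
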